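-- pv_equiv track=rewrite | github.com/Pyk017/Competetive-Programming | Virtusa_Test_Questions/Find_Me_Out.py | find_me_out
-- ===== SOURCE A (Python) =====
-- def find_me_out(input1):
--     n = 2
--     while n <= 10000:
--         sumi = sum(list(map(int, str(n))))
--         if n % input1 == 0 and sumi == input1 and n != input1:
--             return n
--         n += 1
--
--     return -1
-- ===== SOURCE B (Python) =====
-- def find_me_out(input1):
--     limit = 10000 // input1
--     for k in range(1, limit + 1):
--         n = k * input1
--         if n >= 2 and sum(map(int, str(n))) == input1 and n != input1:
--             return n
--     return -1
-- ===== Notes on version B (the rewrite author's own statement) =====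
-- stated objective: faster
-- what changed: B enumerates only the multiples k*input1 for k in 1..10000//input1 instead of scanning every n in 2..10000 and testing divisibility, checking n>=2, digit-sum(n)==input1 and n!=input1 on each candidate.
import Mathlib
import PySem

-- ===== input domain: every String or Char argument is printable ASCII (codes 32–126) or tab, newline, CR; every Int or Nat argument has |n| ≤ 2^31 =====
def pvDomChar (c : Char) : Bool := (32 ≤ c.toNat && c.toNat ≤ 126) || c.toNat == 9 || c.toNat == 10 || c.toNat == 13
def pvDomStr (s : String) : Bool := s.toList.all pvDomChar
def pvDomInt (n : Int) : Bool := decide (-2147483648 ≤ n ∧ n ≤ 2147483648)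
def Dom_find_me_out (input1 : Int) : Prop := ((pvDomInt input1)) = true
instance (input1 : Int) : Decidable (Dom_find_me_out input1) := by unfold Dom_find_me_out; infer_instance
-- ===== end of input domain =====

-- B enumerates only the multiples of input1 (k*input1 for k = 1 .. 10000//input1) instead of
-- scanning every n in 2..10000 and testing divisibility; objective: faster (fewer candidates).


-- ===== PORT A =====
-- int(ch) for one character; exact here: both programs apply it only to the decimal digit
-- characters of str(n) for n ≥ 2, where int() succeeds (the default 0 is never used).
def pyCharInt (c : Char) : Int := (PySem.Int.ofChars? [c]).getD 0

-- sum(list(map(int, str(n))))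
def digitSum (n : Int) : Int := ((PySem.Int.toChars n).map pyCharInt).sum

-- the while loop 'n = 2; while n <= 10000: …; n += 1'
def findLoopA (input1 : Int) (n : Nat) : Int :=
  if n ≤ 10000 then
    if PySem.Int.mod (n : Int) input1 = 0 ∧ digitSum (n : Int) = input1 ∧ (n : Int) ≠ input1 then
      (n : Int)
    else findLoopA input1 (n + 1)
  else -1
termination_by 10001 - n

def find_me_out (input1 : Int) : Int := findLoopA input1 2

-- ===== PORT B =====
-- 'for k in range(1, limit + 1): n = k * input1; …; return -1'
def altLoopB (input1 : Int) : List Int → Int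
  | [] => -1
  | k :: ks =>
    if 2 ≤ k * input1 ∧ digitSum (k * input1) = input1 ∧ k * input1 ≠ input1 then k * input1
    else altLoopB input1 ks

def find_me_out_alt (input1 : Int) : Int :=
  altLoopB input1 (PySem.List.pyRange 1 (PySem.Int.floordiv 10000 input1 + 1) 1)

-- ===== PRECONDITION & SPEC =====
-- input1 = 0 makes A raise ZeroDivisionError at 'n % input1' (and B at '10000 // input1').
def Pre_find_me_out (input1 : Int) : Prop := input1 ≠ 0
instance (input1 : Int) : Decidable (Pre_find_me_out input1) := by unfold Pre_find_me_out; infer_instance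
def pvWitness_find_me_out : Int := 3

def Spec_find_me_out (input1 : Int) (out : Int) : Prop := out = find_me_out_alt input1
instance (input1 : Int) (out : Int) : Decidable (Spec_find_me_out input1 out) := by unfold Spec_find_me_out; infer_instance

-- ===== CLAIM (what is proved, stated in full; the proofs are below) =====
def Claim_equal_find_me_out : Prop := ∀ (input1 : Int), Dom_find_me_out input1 → Pre_find_me_out input1 → Spec_find_me_out input1 (find_me_out input1)

-- ===== LEMMAS AND PROOFS =====

-- every character str() produces for a nonnegative number reads back as a nonnegative int
lemma pyCharInt_digitChar_nonneg (d : Nat) (hd : d < 10) : 0 ≤ pyCharInt (Nat.digitChar d) := by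
  interval_cases d <;> decide

lemma toDigitsCore_chars_nonneg (f : Nat) :
    ∀ (m : Nat) (acc : List Char), (∀ c ∈ acc, 0 ≤ pyCharInt c) →
      ∀ c ∈ Nat.toDigitsCore 10 f m acc, 0 ≤ pyCharInt c := by
  induction f with
  | zero => intro m acc hacc c hc; exact hacc c hc
  | succ f ih =>
    intro m acc hacc c hc
    simp only [Nat.toDigitsCore] at hc
    by_cases h0 : m / 10 = 0
    · simp only [h0] at hc
      rcases List.mem_cons.mp hc with h | h
      · subst h; exact pyCharInt_digitChar_nonneg _ (Nat.mod_lt _ (by norm_num))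
      · exact hacc c h
    · simp only [h0] at hc
      refine ih (m / 10) _ ?_ c hc
      intro c' hc'
      rcases List.mem_cons.mp hc' with h | h
      · subst h; exact pyCharInt_digitChar_nonneg _ (Nat.mod_lt _ (by norm_num))
      · exact hacc c' h

lemma digitSum_nonneg (n : Int) (hn : 0 ≤ n) : 0 ≤ digitSum n := by
  apply List.sum_nonneg
  intro x hx
  rcases List.mem_map.mp hx with ⟨c, hc, rfl⟩
  have : ¬ n < 0 := not_lt.mpr hn
  simp only [PySem.Int.toChars, if_neg this, Nat.toDigits] at hc
  exact toDigitsCore_chars_nonneg _ _ _ (by simp) c hc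

-- A's loop as a first-match search over range(n, 10001)
def predA (d m : Int) : Bool :=
  decide (PySem.Int.mod m d = 0 ∧ digitSum m = d ∧ m ≠ d)

lemma findLoopA_eq_find? (d : Int) (n : Nat) :
    findLoopA d n = ((PySem.List.pyRange (n : Int) 10001 1).find? (predA d)).getD (-1) := by
  fun_induction findLoopA d n with
  | case1 n hle hP =>
    rw [PySem.List.pyRange_one_cons (by exact_mod_cast Nat.lt_succ_of_le hle),
        List.find?_cons_of_pos (by simpa [predA] using hP)]
    rfl
  | case2 n hle hP ih =>
    rw [PySem.List.pyRange_one_cons (by exact_mod_cast Nat.lt_succ_of_le hle),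
        List.find?_cons_of_neg (by simpa [predA] using hP)]
    have e : ((n + 1 : Nat) : Int) = (n : Int) + 1 := by push_cast; ring
    rw [e] at ih
    exact ih
  | case3 n hle =>
    rw [PySem.List.pyRange_one_eq_nil (by omega)]
    rfl

-- B's loop as a first-match search over the multiples list
def predB (d m : Int) : Bool :=
  decide (2 ≤ m ∧ digitSum m = d ∧ m ≠ d)

lemma altLoopB_eq_find? (d : Int) (l : List Int) :
    altLoopB d l = ((l.map (· * d)).find? (predB d)).getD (-1) := by
  induction l with
  | nil => rfl
  | cons k ks ih =>
    simp only [altLoopB, List.map_cons]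
    by_cases h : 2 ≤ k * d ∧ digitSum (k * d) = d ∧ k * d ≠ d
    · rw [if_pos h, List.find?_cons_of_pos (by simpa [predB] using h)]
      rfl
    · rw [if_neg h, List.find?_cons_of_neg (by simpa [predB] using h)]
      exact ih

-- splitting a first-match search at a conjunct: find? (p && q) = find? q on the p-filtered list
lemma find?_and_filter {α : Type} (p q : α → Bool) (l : List α) :
    l.find? (fun a => p a && q a) = (l.filter p).find? q := by
  induction l with
  | nil => rfl
  | cons x xs ih =>
    by_cases hp : p x = true
    · by_cases hq : q x = true
      · rw [List.filter_cons_of_pos hp, List.find?_cons_of_pos (by simp [hp, hq]),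
            List.find?_cons_of_pos hq]
      · rw [List.filter_cons_of_pos hp, List.find?_cons_of_neg (by simp [hp, hq]),
            List.find?_cons_of_neg (by simpa using hq), ih]
    · rw [List.filter_cons_of_neg (by simpa using hp),
          List.find?_cons_of_neg (by simp [hp]), ih]

-- the candidate lists of A and B agree after filtering: multiples of d in [2,10000]
lemma filter_lists_eq (d : Int) (hd : 1 ≤ d) :
    (PySem.List.pyRange 2 10001 1).filter (fun m => decide (d ∣ m)) =
      ((PySem.List.pyRange 1 (PySem.Int.floordiv 10000 d + 1) 1).map (· * d)).filter
        (fun m => decide (2 ≤ m)) := by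
  have hd0 : (0 : Int) < d := hd
  apply List.Perm.eq_of_pairwise (le := (· ≤ ·)) (fun a b _ _ h1 h2 => le_antisymm h1 h2)
  · exact List.Pairwise.filter _ ((PySem.List.pairwise_lt_pyRange_one 2 10001).imp le_of_lt)
  · refine List.Pairwise.filter _ (List.Pairwise.map _ ?_ (PySem.List.pairwise_lt_pyRange_one _ _))
    intro a b hab
    exact le_of_lt (by exact mul_lt_mul_of_pos_right hab hd0)
  · rw [List.perm_ext_iff_of_nodup]
    · intro m
      simp only [List.mem_filter, PySem.List.mem_pyRange_one, List.mem_map, decide_eq_true_eq]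
      constructor
      · rintro ⟨⟨h2, h10001⟩, k, rfl⟩
        refine ⟨⟨k, ⟨?_, ?_⟩, by ring⟩, h2⟩
        · nlinarith
        · rw [Int.lt_add_one_iff, PySem.Int.le_floordiv_iff_mul_le hd0]; nlinarith
      · rintro ⟨⟨k, ⟨hk1, hk2⟩, rfl⟩, h2⟩
        rw [Int.lt_add_one_iff, PySem.Int.le_floordiv_iff_mul_le hd0] at hk2
        exact ⟨⟨h2, by nlinarith⟩, k, by ring⟩
    · exact (PySem.List.nodup_pyRange_one 2 10001).filter _
    · refine List.Nodup.filter _ (List.Nodup.map ?_ (PySem.List.nodup_pyRange_one _ _))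
      intro a b hab
      exact mul_right_cancel₀ (by omega) hab

-- the two search predicates, split into (membership test) && (common remainder)
lemma predA_split (d : Int) (m : Int) :
    predA d m = ((fun x => decide (d ∣ x)) m && (fun x => decide (digitSum x = d ∧ x ≠ d)) m) := by
  simp only [predA, PySem.Int.mod_eq_zero_iff_dvd]
  by_cases h1 : d ∣ m <;> by_cases h2 : digitSum m = d ∧ m ≠ d <;> simp [h1, h2]

lemma predB_split (d : Int) (m : Int) :
    predB d m = ((fun x => decide (2 ≤ x)) m && (fun x => decide (digitSum x = d ∧ x ≠ d)) m) := by
  simp only [predB]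
  by_cases h1 : (2 : Int) ≤ m <;> by_cases h2 : digitSum m = d ∧ m ≠ d <;> simp [h1, h2]

-- main case 1 ≤ d ≤ 10000: both searches find the same first element
lemma main_case (d : Int) (hd1 : 1 ≤ d) (hd2 : d ≤ 10000) :
    find_me_out d = find_me_out_alt d := by
  rw [find_me_out, findLoopA_eq_find?, find_me_out_alt, altLoopB_eq_find?]
  have hA : (PySem.List.pyRange ((2 : Nat) : Int) 10001 1).find? (predA d)
      = ((PySem.List.pyRange 1 (PySem.Int.floordiv 10000 d + 1) 1).map (· * d)).find? (predB d) := by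
    have e1 : ((2 : Nat) : Int) = (2 : Int) := by norm_num
    have eA := funext (predA_split d)
    have eB := funext (predB_split d)
    rw [e1, eA, find?_and_filter, eB, find?_and_filter, filter_lists_eq d hd1]
  rw [hA]

-- d < 0: A finds nothing (digit sums of n ≥ 2 are nonnegative), B's range is empty
lemma neg_case (d : Int) (hd : d < 0) : find_me_out d = find_me_out_alt d := by
  rw [find_me_out, findLoopA_eq_find?, find_me_out_alt, altLoopB_eq_find?]
  have hA : (PySem.List.pyRange ((2 : Nat) : Int) 10001 1).find? (predA d) = none := by
    rw [List.find?_eq_none]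
    intro m hm
    rw [PySem.List.mem_pyRange_one] at hm
    simp only [predA, decide_eq_true_eq, not_and]
    intro _ hsum
    have := digitSum_nonneg m (by omega)
    omega
  have hB : PySem.List.pyRange 1 (PySem.Int.floordiv 10000 d + 1) 1 = [] := by
    apply PySem.List.pyRange_one_eq_nil
    have h1 : PySem.Int.floordiv 10000 d * d + PySem.Int.mod 10000 d = 10000 :=
      PySem.Int.floordiv_mul_add_mod 10000 d
    have h2 := PySem.Int.mod_neg_bounds (a := 10000) (b := d) hd
    nlinarith [h2.1, h2.2]
  rw [hA, hB]
  rfl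

-- d > 10000: n % d = n ≠ 0 for every scanned n, and B's range is empty
lemma big_case (d : Int) (hd : 10000 < d) : find_me_out d = find_me_out_alt d := by
  rw [find_me_out, findLoopA_eq_find?, find_me_out_alt, altLoopB_eq_find?]
  have hA : (PySem.List.pyRange ((2 : Nat) : Int) 10001 1).find? (predA d) = none := by
    rw [List.find?_eq_none]
    intro m hm
    rw [PySem.List.mem_pyRange_one] at hm
    simp only [predA, decide_eq_true_eq, not_and]
    intro hmod
    rw [PySem.Int.mod_eq_zero_iff_dvd] at hmod
    exfalso
    rcases Int.le_of_dvd (by omega) hmod with h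
    omega
  have hB : PySem.Int.floordiv 10000 d = 0 := by
    rw [PySem.Int.floordiv_eq_iff_of_pos (by omega)]
    omega
  rw [hA, hB]
  rfl

-- ===== VERDICT (by name: the statement is the Claim_ definition above) =====
theorem find_me_out_spec : Claim_equal_find_me_out := by
  intro d _ hpre
  unfold Spec_find_me_out
  rcases lt_trichotomy d 0 with hneg | hzero | hpos
  · exact neg_case d hneg
  · exact absurd hzero hpre
  · rcases le_or_gt d 10000 with hle | hgt
    · exact main_case d (by omega) hle
    · exact big_case d hgt
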